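-- pv_equiv track=rewrite | github.com/yhabib29/Action-Recognition-GCA-LSTM | GCA-LSTM.py | gen_order
-- ===== SOURCE A (Python) =====
-- def gen_order(gnd_classes):
--     """
--     Generate list of intervals to split the original sequence into variable length sequence with the same action.
--     :param gnd_classes:     Ground Truth classes
--     :return:                List of intervals
--     """
--     changes = [g for g in range(1,len(gnd_classes)) if gnd_classes[g-1] != gnd_classes[g]]
--     order_ = []
--     start = 0
--     # Select all frames sequences label per label
--     for g in changes:
--         if gnd_classes[g-1] != -1:
--             order_.append([start, g])
--         start = g
--     if gnd_classes[start] != -1: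
--         order_.append([start,len(gnd_classes)])
--     # TODO: Remove this block
--     # for k in range(1, len(gnd_classes)):
--     #     # Move start to get only data with label
--     #     if gnd_classes[k-1] == -1:
--     #         start = k
--     #         continue
--     #     # Last frame
--     #     if k + 1 == len(gnd_classes) and gnd_classes[k] != -1:
--     #         end = k + 1
--     #         order_.append([start, end])
--     #     # If next frame is the same action
--     #     elif gnd_classes[k] == gnd_classes[k - 1]:
--     #         continue
--     #     elif gnd_classes[k] != gnd_classes[k - 1]:
--     #         end = k
--     #         order_.append([start, end])
--     #         start = k
--     return order_
-- ===== SOURCE B (Python) =====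
-- def gen_order(gnd_classes):
--     """Two-pointer run scan: advance j to the end of each run of equal labels,
--     emit [i, j] for runs whose label is not -1."""
--     order_ = []
--     i = 0
--     n = len(gnd_classes)
--     while i < n:
--         j = i
--         while j < n and gnd_classes[j] == gnd_classes[i]:
--             j += 1
--         if gnd_classes[i] != -1:
--             order_.append([i, j])
--         i = j
--     return order_
-- ===== Notes on version B (the rewrite author's own statement) =====
-- stated objective: alternative
-- what changed: B replaces A's precomputed list of change indices plus a fold over it by a two-pointer run scan that advances j to the end of each run of equal labels and emits the interval directly.
-- crash fix: On the empty list A raises IndexError (the trailing gnd_classes[start] lookup); B naturally returns []. — e.g. on gen_order([]): A raises IndexError, B returns []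
import Mathlib
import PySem

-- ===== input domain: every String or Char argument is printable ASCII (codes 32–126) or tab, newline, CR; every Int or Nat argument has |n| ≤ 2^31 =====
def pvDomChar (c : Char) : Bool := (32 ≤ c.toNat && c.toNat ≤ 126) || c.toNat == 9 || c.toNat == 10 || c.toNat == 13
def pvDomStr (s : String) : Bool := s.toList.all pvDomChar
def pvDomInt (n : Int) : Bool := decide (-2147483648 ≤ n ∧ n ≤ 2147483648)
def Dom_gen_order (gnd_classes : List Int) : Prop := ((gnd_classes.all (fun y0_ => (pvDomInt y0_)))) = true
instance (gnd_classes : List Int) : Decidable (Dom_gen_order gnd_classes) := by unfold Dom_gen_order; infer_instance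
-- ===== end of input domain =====

-- B replaces A's change-index list + fold by a two-pointer run scan; same O(n) cost, different decomposition.

-- ===== PORT A =====
-- indexing is via pyGetD (default 0); Pre_ (nonempty list) keeps every index A reads in range
def gen_order (gnd_classes : List Int) : List (List Int) :=
  let changes := (PySem.List.pyRange 1 (gnd_classes.length : Int) 1).filter
    (fun g => PySem.List.pyGetD gnd_classes (g - 1) 0 != PySem.List.pyGetD gnd_classes g 0)
  let st := changes.foldl
    (fun (st : List (List Int) × Int) g =>
      ((if PySem.List.pyGetD gnd_classes (g - 1) 0 != -1 then st.1 ++ [[st.2, g]] else st.1), g))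
    ([], 0)
  if PySem.List.pyGetD gnd_classes st.2 0 != -1 then
    st.1 ++ [[st.2, (gnd_classes.length : Int)]]
  else st.1

-- ===== PORT B =====
-- inner while loop of Source B: smallest index ≥ j at which the value differs from v (fuel only makes it total)
def pvRunEnd (l : List Int) (v : Int) : Nat → Nat → Nat
  | j, 0 => j
  | j, fuel + 1 =>
    if h : j < l.length then
      if l[j] = v then pvRunEnd l v (j + 1) fuel else j
    else j

-- outer while loop of Source B (fuel only makes it total; i strictly increases each pass)
def pvScan (l : List Int) : Nat → Nat → List (List Int)
  | _, 0 => []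
  | i, fuel + 1 =>
    if h : i < l.length then
      let j := pvRunEnd l l[i] i (l.length - i)
      (if l[i] != -1 then [[(i : Int), (j : Int)]] else []) ++ pvScan l j fuel
    else []

def gen_order_alt (gnd_classes : List Int) : List (List Int) :=
  pvScan gnd_classes 0 gnd_classes.length

-- ===== PRECONDITION & SPEC =====
-- A raises IndexError on the empty list (the trailing gnd_classes[start] lookup), so Pre_ excludes it.
def Pre_gen_order (gnd_classes : List Int) : Prop := gnd_classes ≠ []
instance (gnd_classes : List Int) : Decidable (Pre_gen_order gnd_classes) := by unfold Pre_gen_order; infer_instance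
def pvWitness_gen_order : List Int := ([1, 1, -1, 2])

-- On the empty list A raises IndexError; B naturally returns [].
def Raises_gen_order (gnd_classes : List Int) : Prop := gnd_classes = []
instance (gnd_classes : List Int) : Decidable (Raises_gen_order gnd_classes) := by unfold Raises_gen_order; infer_instance
def pvRaiseWitness_gen_order : List Int := ([])
def pvRaiseWitnessOut_gen_order : List (List Int) := []

def Spec_gen_order (gnd_classes : List Int) (out : List (List Int)) : Prop := out = gen_order_alt gnd_classes
instance (gnd_classes : List Int) (out : List (List Int)) : Decidable (Spec_gen_order gnd_classes out) := by unfold Spec_gen_order; infer_instance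

-- ===== CLAIM (what is proved, stated in full; the proofs are below) =====
def Claim_equal_gen_order : Prop := ∀ (gnd_classes : List Int), Dom_gen_order gnd_classes → Pre_gen_order gnd_classes → Spec_gen_order gnd_classes (gen_order gnd_classes)
def Claim_raises_gen_order : Prop := (∀ (gnd_classes : List Int), Dom_gen_order gnd_classes → Raises_gen_order gnd_classes → ¬ Pre_gen_order gnd_classes) ∧ (Dom_gen_order (pvRaiseWitness_gen_order) ∧ Raises_gen_order (pvRaiseWitness_gen_order) ∧ gen_order_alt (pvRaiseWitness_gen_order) = pvRaiseWitnessOut_gen_order)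

-- ===== LEMMAS AND PROOFS =====

theorem pvRunEnd_ge (l : List Int) (v : Int) : ∀ fuel j, j ≤ pvRunEnd l v j fuel := by
  intro fuel
  induction fuel with
  | zero => intro j; simp [pvRunEnd]
  | succ fuel ih =>
    intro j
    simp only [pvRunEnd]
    split
    · split
      · exact Nat.le_of_succ_le (ih (j + 1))
      · exact Nat.le_refl j
    · exact Nat.le_refl j

theorem pvRunEnd_progress (l : List Int) (v : Int) (fuel j : Nat) (h : j < l.length)
    (hv : l[j] = v) (hf : 1 ≤ fuel) : j < pvRunEnd l v j fuel := by
  cases fuel with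
  | zero => omega
  | succ fuel =>
    simp only [pvRunEnd, dif_pos h, if_pos hv]
    have := pvRunEnd_ge l v fuel (j + 1)
    omega

theorem pvRunEnd_le (l : List Int) (v : Int) : ∀ fuel j, j ≤ l.length →
    pvRunEnd l v j fuel ≤ l.length := by
  intro fuel
  induction fuel with
  | zero => intro j h; simpa [pvRunEnd] using h
  | succ fuel ih =>
    intro j h
    simp only [pvRunEnd]
    split
    · split
      · exact ih (j + 1) (by omega)
      · exact h
    · exact h

theorem pvRunEnd_run (l : List Int) (v : Int) : ∀ fuel j k (_ : j ≤ k)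
    (_ : k < pvRunEnd l v j fuel) (hkl : k < l.length), l[k] = v := by
  intro fuel
  induction fuel with
  | zero => intro j k h1 h2 _; simp [pvRunEnd] at h2; omega
  | succ fuel ih =>
    intro j k h1 h2 hkl
    simp only [pvRunEnd] at h2
    split at h2
    · split at h2
      · rcases Nat.eq_or_lt_of_le h1 with rfl | hlt
        · assumption
        · exact ih (j + 1) k hlt h2 hkl
      · omega
    · omega

theorem pvRunEnd_stop (l : List Int) (v : Int) : ∀ fuel j (_ : l.length - j ≤ fuel)
    (_ : pvRunEnd l v j fuel < l.length), l.getD (pvRunEnd l v j fuel) 0 ≠ v := by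
  intro fuel
  induction fuel with
  | zero => intro j hf h; simp [pvRunEnd] at h ⊢; omega
  | succ fuel ih =>
    intro j hf h
    simp only [pvRunEnd] at h ⊢
    by_cases hj : j < l.length
    · by_cases hv : l[j] = v
      · simp only [dif_pos hj, if_pos hv] at h ⊢
        exact ih (j + 1) (by omega) h
      · simp only [dif_pos hj, if_neg hv] at h ⊢
        rw [List.getD_eq_getElem l 0 hj]
        exact hv
    · simp only [dif_neg hj] at h; omega

theorem pvScan_stop (l : List Int) (i : Nat) (hi : ¬ i < l.length) :
    ∀ fuel, pvScan l i fuel = [] := by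
  intro fuel
  cases fuel with
  | zero => rfl
  | succ fuel => simp [pvScan, hi]

-- entries strictly inside a run are not change points, so the filter skips them
theorem filter_skip_run (l : List Int) (i : Nat) (hi : i < l.length)
    (j : Nat) (hj : j ≤ l.length)
    (hrun : ∀ k, i ≤ k → k < j → ∀ hk : k < l.length, l[k] = l[i]'hi) :
    ∀ k : Nat, i + 1 ≤ k → k ≤ j →
    ((PySem.List.pyRange (k : Int) (l.length : Int) 1).filter
        (fun g => PySem.List.pyGetD l (g - 1) 0 != PySem.List.pyGetD l g 0))
    = ((PySem.List.pyRange (j : Int) (l.length : Int) 1).filter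
        (fun g => PySem.List.pyGetD l (g - 1) 0 != PySem.List.pyGetD l g 0)) := by
  have H : ∀ d k, i + 1 ≤ k → k ≤ j → j - k = d →
      ((PySem.List.pyRange (k : Int) (l.length : Int) 1).filter
          (fun g => PySem.List.pyGetD l (g - 1) 0 != PySem.List.pyGetD l g 0))
      = ((PySem.List.pyRange (j : Int) (l.length : Int) 1).filter
          (fun g => PySem.List.pyGetD l (g - 1) 0 != PySem.List.pyGetD l g 0)) := by
    intro d
    induction d with
    | zero =>
      intro k h1 h2 h3
      have hkj : k = j := by omega
      subst hkj
      rfl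
    | succ d ih =>
      intro k h1 h2 h3
      have hkj : k < j := by omega
      have hklen : k < l.length := by omega
      rw [PySem.List.pyRange_one_cons (by exact_mod_cast hklen)]
      rw [List.filter_cons]
      have e1 : ((k : Int) - 1) = ((k - 1 : Nat) : Int) := by omega
      have hpk : (PySem.List.pyGetD l ((k : Int) - 1) 0 != PySem.List.pyGetD l (k : Int) 0) = false := by
        rw [e1, PySem.List.pyGetD_natCast, PySem.List.pyGetD_natCast]
        have g1 : (l[k - 1]?).getD 0 = l[i]'hi := by
          rw [List.getElem?_eq_getElem (by omega : k - 1 < l.length)]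
          simpa using hrun (k - 1) (by omega) (by omega) (by omega)
        have g2 : (l[k]?).getD 0 = l[i]'hi := by
          rw [List.getElem?_eq_getElem hklen]
          simpa using hrun k (by omega) hkj hklen
        simp [List.getD, g1, g2]
      rw [hpk]
      simp only [Bool.false_eq_true, if_false]
      have e2 : ((k : Int) + 1) = ((k + 1 : Nat) : Int) := by omega
      rw [e2]
      exact ih (k + 1) (by omega) (by omega) (by omega)
  exact fun k h1 h2 => H (j - k) k h1 h2 rfl

-- A's trailing "if gnd_classes[start] != -1: append [start, len]" as a function of the fold state
def pvFinal (l : List Int) (st : List (List Int) × Int) : List (List Int) :=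
  if PySem.List.pyGetD l st.2 0 != -1 then st.1 ++ [[st.2, (l.length : Int)]] else st.1

-- the main loop invariant: from any run start i, A's fold + final append equals B's scan
theorem gen_order_main (l : List Int) : ∀ fuel i acc, i < l.length → l.length - i ≤ fuel →
    pvFinal l (((PySem.List.pyRange ((i : Int) + 1) (l.length : Int) 1).filter
        (fun g => PySem.List.pyGetD l (g - 1) 0 != PySem.List.pyGetD l g 0)).foldl
      (fun (st : List (List Int) × Int) g =>
        ((if PySem.List.pyGetD l (g - 1) 0 != -1 then st.1 ++ [[st.2, g]] else st.1), g))
      (acc, (i : Int)))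
    = acc ++ pvScan l i fuel := by
  intro fuel
  induction fuel with
  | zero => intro i acc hi hf; exact absurd hf (by omega)
  | succ fuel ih =>
    intro i acc hi hf
    have hgi : PySem.List.pyGetD l (i : Int) 0 = l[i]'hi := by
      rw [PySem.List.pyGetD_natCast, List.getD_eq_getElem l 0 hi]
    obtain ⟨j, hjdef⟩ : ∃ j, pvRunEnd l (l[i]'hi) i (l.length - i) = j := ⟨_, rfl⟩
    have hij : i < j := hjdef ▸ pvRunEnd_progress l (l[i]'hi) (l.length - i) i hi rfl (by omega)
    have hjle : j ≤ l.length := hjdef ▸ pvRunEnd_le l _ (l.length - i) i (Nat.le_of_lt hi)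
    have hrun : ∀ k, i ≤ k → k < j → ∀ hk : k < l.length, l[k] = l[i]'hi :=
      fun k h1 h2 hk => pvRunEnd_run l _ (l.length - i) i k h1 (hjdef ▸ h2) hk
    have ecast : ((i : Int) + 1) = ((i + 1 : Nat) : Int) := by omega
    rw [ecast, filter_skip_run l i hi j hjle hrun (i + 1) (Nat.le_refl _) (by omega)]
    have hscan : pvScan l i (fuel + 1) =
        (if l[i]'hi != -1 then [[(i : Int), (j : Int)]] else []) ++ pvScan l j fuel := by
      conv_lhs => rw [pvScan]
      rw [dif_pos hi, hjdef]
    rw [hscan]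
    by_cases hjlen : j < l.length
    · rw [PySem.List.pyRange_one_cons (show (j : Int) < (l.length : Int) from by exact_mod_cast hjlen)]
      have ej : ((j : Int) - 1) = ((j - 1 : Nat) : Int) := by omega
      have gj1 : PySem.List.pyGetD l ((j : Int) - 1) 0 = l[i]'hi := by
        rw [ej, PySem.List.pyGetD_natCast, List.getD_eq_getElem l 0 (by omega : j - 1 < l.length)]
        exact hrun (j - 1) (by omega) (by omega) (by omega)
      have gj2 : PySem.List.pyGetD l (j : Int) 0 ≠ l[i]'hi := by
        have hstop := pvRunEnd_stop l (l[i]'hi) (l.length - i) i (Nat.le_refl _)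
          (by rw [hjdef]; exact hjlen)
        rw [hjdef] at hstop
        rw [PySem.List.pyGetD_natCast]
        exact hstop
      have hpj : ((fun g => PySem.List.pyGetD l (g - 1) 0 != PySem.List.pyGetD l g 0) ((j : Int))) = true := by
        simp only [bne_iff_ne, ne_eq, gj1]
        exact fun h => gj2 h.symm
      rw [List.filter_cons, if_pos hpj, List.foldl_cons]
      simp only [gj1]
      rw [ih j _ hjlen (by omega)]
      by_cases hv : l[i]'hi = -1 <;> simp [hv, List.append_assoc]
    · have hje : (j : Int) = (l.length : Int) := by omega
      rw [PySem.List.pyRange_one_eq_nil (by exact_mod_cast (show l.length ≤ j by omega))]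
      rw [pvScan_stop l j hjlen fuel]
      simp only [List.filter_nil, List.foldl_nil, pvFinal, hgi]
      by_cases hv : l[i]'hi = -1 <;> simp [hv, hje]

-- ===== VERDICT (by name: the statement is the Claim_ definition above) =====
theorem gen_order_spec : Claim_equal_gen_order := by
  intro l _ hpre
  have hlen : 0 < l.length := List.length_pos_iff.mpr hpre
  have h := gen_order_main l l.length 0 [] hlen (by omega)
  simp only [Nat.cast_zero, zero_add, List.nil_append] at h
  unfold Spec_gen_order gen_order gen_order_alt
  exact h

@[simp] theorem gen_order_raises : Claim_raises_gen_order := by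
  unfold Claim_raises_gen_order
  exact ⟨fun l _ h => by simp [Raises_gen_order] at h; simp [h, Pre_gen_order], by decide⟩
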